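-- pv_equiv track=rewrite | github.com/MoritzSchwerer/TensorBro | tensorbro/code_gen/clang.py | gen_index_accumulating
-- ===== SOURCE A (Python) =====
-- CHARACTERS = list(map(chr, range(97, 123)))
--
-- def gen_index_accumulating(shape, stride, acc_dim):
--     idx_calc = ""
--     for i in range(len(shape)):
--         if i == acc_dim:
--             continue
--         idx_calc += f"{CHARACTERS[i]}"
--         for j in range(i+1,len(shape)):
--             idx_calc += f" * {shape[j]}" if j != acc_dim else ""
--         idx_calc += " + "
--     idx_calc = idx_calc[:-3]
--     return idx_calc
-- ===== SOURCE B (Python) =====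
-- CHARACTERS = list(map(chr, range(97, 123)))
--
-- def gen_index_accumulating(shape, stride, acc_dim):
--     # One right-to-left pass maintaining the accumulated " * shape[j]" suffix,
--     # instead of re-scanning the tail for every index.
--     terms = []
--     suffix = ""
--     for i in range(len(shape) - 1, -1, -1):
--         if i != acc_dim:
--             terms.append(CHARACTERS[i] + suffix)
--             suffix = " * " + str(shape[i]) + suffix
--     terms.reverse()
--     return " + ".join(terms)
-- ===== Notes on version B (the rewrite author's own statement) =====
-- stated objective: alternative
-- what changed: Replaced the nested rescan of trailing ' * shape[j]' factors by a single right-to-left pass that maintains the accumulated suffix string, collecting the terms and joining them with ' + ' instead of stripping a trailing separator.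
import Mathlib
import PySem

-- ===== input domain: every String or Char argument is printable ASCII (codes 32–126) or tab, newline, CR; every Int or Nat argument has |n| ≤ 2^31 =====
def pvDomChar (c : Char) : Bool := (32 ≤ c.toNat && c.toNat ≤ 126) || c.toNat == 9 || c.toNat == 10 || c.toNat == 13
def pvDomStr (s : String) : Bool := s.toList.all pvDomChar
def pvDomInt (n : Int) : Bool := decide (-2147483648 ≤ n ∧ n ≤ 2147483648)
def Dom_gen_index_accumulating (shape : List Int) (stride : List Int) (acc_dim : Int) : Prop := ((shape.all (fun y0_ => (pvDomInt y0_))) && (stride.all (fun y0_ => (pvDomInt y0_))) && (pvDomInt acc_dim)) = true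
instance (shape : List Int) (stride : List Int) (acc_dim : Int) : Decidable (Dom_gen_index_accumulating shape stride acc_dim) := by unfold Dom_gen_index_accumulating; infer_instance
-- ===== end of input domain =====

-- B replaces A's nested rescan of trailing factors by one right-to-left pass with a
-- maintained suffix accumulator, joining terms instead of stripping a trailing separator.

-- CHARACTERS = list(map(chr, range(97, 123)))
def pvChars : List Char := (List.range 26).map (fun k => Char.ofNat (97 + k))

-- ===== PORT A =====
-- CHARACTERS[i] : Pre_ guarantees i < 26, so getD is exact; shape[j] has j < len(shape), exact.
-- idx_calc[:-3] = take (length - 3), exact for every length (clamps to "" like Python).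
def gen_index_accumulating (shape : List Int) (stride : List Int) (acc_dim : Int) : String :=
  let n := shape.length
  let idx_calc : List Char := (List.range n).foldl (fun acc (i : Nat) =>
    if (i : Int) = acc_dim then acc
    else
      let acc1 := acc ++ [pvChars.getD i ' ']
      let acc2 := (List.range' (i+1) (n - (i+1))).foldl (fun a (j : Nat) =>
        a ++ (if (j : Int) ≠ acc_dim then (" * " ++ PySem.Int.toStr (shape.getD j 0)).toList else [])) acc1
      acc2 ++ (" + ").toList) []
  String.mk (idx_calc.take (idx_calc.length - 3))

-- ===== PORT B =====
-- range(len-1, -1, -1) ported as (List.range n).reverse; " + ".join as List.intercalate.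
def gen_index_accumulating_alt (shape : List Int) (stride : List Int) (acc_dim : Int) : String :=
  let n := shape.length
  let st := (List.range n).reverse.foldl (fun (st : List (List Char) × List Char) (i : Nat) =>
    if (i : Int) ≠ acc_dim then
      (st.1 ++ [pvChars.getD i ' ' :: st.2],
       (" * " ++ PySem.Int.toStr (shape.getD i 0)).toList ++ st.2)
    else st) ([], [])
  String.mk (List.intercalate (" + ").toList st.1.reverse)

-- ===== PRECONDITION & SPEC =====
-- Pre_ excludes exactly the inputs on which A raises IndexError (an index i ≥ 26 of shape
-- other than acc_dim reaches CHARACTERS[i]); B raises there too.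
def Pre_gen_index_accumulating (shape : List Int) (stride : List Int) (acc_dim : Int) : Prop :=
  ∀ i : Nat, i < shape.length → 26 ≤ i → (i : Int) = acc_dim
instance (shape : List Int) (stride : List Int) (acc_dim : Int) : Decidable (Pre_gen_index_accumulating shape stride acc_dim) := by unfold Pre_gen_index_accumulating; infer_instance

def pvWitness_gen_index_accumulating : List Int × List Int × Int := ([2, 3, 4], [12, 4, 1], 1)

def Spec_gen_index_accumulating (shape : List Int) (stride : List Int) (acc_dim : Int) (out : String) : Prop := out = gen_index_accumulating_alt shape stride acc_dim
instance (shape : List Int) (stride : List Int) (acc_dim : Int) (out : String) : Decidable (Spec_gen_index_accumulating shape stride acc_dim out) := by unfold Spec_gen_index_accumulating; infer_instance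

-- ===== CLAIM (what is proved, stated in full; the proofs are below) =====
def Claim_equal_gen_index_accumulating : Prop := ∀ (shape : List Int) (stride : List Int) (acc_dim : Int), Dom_gen_index_accumulating shape stride acc_dim → Pre_gen_index_accumulating shape stride acc_dim → Spec_gen_index_accumulating shape stride acc_dim (gen_index_accumulating shape stride acc_dim)

-- ===== LEMMAS AND PROOFS =====

-- the " * {shape[j]}" factor of index j (empty when j is the accumulation dim)
def pvFac (shape : List Int) (acc_dim : Int) (j : Nat) : List Char :=
  if (j : Int) = acc_dim then [] else (" * " ++ PySem.Int.toStr (shape.getD j 0)).toList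

-- the term generated for index i with the tail indices js
def pvTerm (shape : List Int) (acc_dim : Int) (i : Nat) (js : List Nat) : List Char :=
  pvChars.getD i ' ' :: (js.map (pvFac shape acc_dim)).flatten

-- A's inner loop is the factor concatenation
theorem pvInnerA (shape : List Int) (acc_dim : Int) (js : List Nat) (a : List Char) :
    js.foldl (fun a (j : Nat) =>
        a ++ (if (j : Int) ≠ acc_dim then (" * " ++ PySem.Int.toStr (shape.getD j 0)).toList else [])) a
      = a ++ (js.map (pvFac shape acc_dim)).flatten := by
  induction js generalizing a with
  | nil => simp
  | cons j js ih =>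
    simp only [List.foldl_cons, List.map_cons, List.flatten_cons, ih, pvFac, List.append_assoc]
    by_cases h : (j : Int) = acc_dim <;> simp [h]

-- A's outer loop over any index list, generalized over the accumulator
theorem pvOuterA (shape : List Int) (acc_dim : Int) (is : List Nat) (n : Nat) (acc : List Char) :
    is.foldl (fun acc (i : Nat) =>
      if (i : Int) = acc_dim then acc
      else
        let acc1 := acc ++ [pvChars.getD i ' ']
        let acc2 := (List.range' (i+1) (n - (i+1))).foldl (fun a (j : Nat) =>
          a ++ (if (j : Int) ≠ acc_dim then (" * " ++ PySem.Int.toStr (shape.getD j 0)).toList else [])) acc1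
        acc2 ++ (" + ").toList) acc
      = acc ++ ((is.filter (fun i : Nat => ((i : Int) ≠ acc_dim))).map
          (fun i => pvTerm shape acc_dim i (List.range' (i+1) (n - (i+1))) ++ (" + ").toList)).flatten := by
  induction is generalizing acc with
  | nil => simp
  | cons i is ih =>
    simp only [List.foldl_cons]
    by_cases h : (i : Int) = acc_dim
    · rw [if_pos h, ih, List.filter_cons_of_neg (by simp [h])]
    · rw [if_neg h, ih, List.filter_cons_of_pos (by simp [h])]
      simp only [pvInnerA]
      simp [pvTerm, List.append_assoc]

-- B's loop, computed as a foldr over the unreversed contiguous index range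
theorem pvLoopB (shape : List Int) (acc_dim : Int) (m : Nat) :
    ∀ (k n : Nat), k + m = n →
    (List.range' k m).foldr (fun (i : Nat) (st : List (List Char) × List Char) =>
        if (i : Int) ≠ acc_dim then
          (st.1 ++ [pvChars.getD i ' ' :: st.2],
           (" * " ++ PySem.Int.toStr (shape.getD i 0)).toList ++ st.2)
        else st) ([], [])
      = ((((List.range' k m).filter (fun i : Nat => ((i : Int) ≠ acc_dim))).map
            (fun i => pvTerm shape acc_dim i (List.range' (i+1) (n - (i+1))))).reverse,
         ((List.range' k m).map (pvFac shape acc_dim)).flatten) := by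
  induction m with
  | zero => intro k n h; simp
  | succ m ih =>
    intro k n h
    rw [List.range'_succ, List.foldr_cons, ih (k+1) n (by omega)]
    by_cases hk : (k : Int) = acc_dim
    · rw [if_neg (by simp [hk]), List.filter_cons_of_neg (by simp [hk])]
      simp [pvFac, hk]
    · rw [if_pos (by simp [hk]), List.filter_cons_of_pos (by simp [hk])]
      have hm : n - (k+1) = m := by omega
      simp [pvTerm, pvFac, hk, hm]

-- joining with a 3-char separator vs appending it after every term and dropping the last 3
theorem pvFlat (L : List (List Char)) (sep : List Char) :
    (L.map (fun t => t ++ sep)).flatten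
      = List.intercalate sep L ++ (if L = [] then [] else sep) := by
  induction L with
  | nil => simp [List.intercalate]
  | cons x xs ih =>
    cases xs with
    | nil => simp [List.intercalate]
    | cons y ys =>
      have hstep : List.intercalate sep (x :: y :: ys)
          = x ++ sep ++ List.intercalate sep (y :: ys) := by
        simp [List.intercalate, List.intersperse]
      simp only [List.map_cons, List.flatten_cons] at *
      rw [ih, hstep]
      simp [List.append_assoc]

theorem pvJoin (L : List (List Char)) (sep : List Char) (hs : sep.length = 3) :
    ((L.map (fun t => t ++ sep)).flatten).take (((L.map (fun t => t ++ sep)).flatten).length - 3)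
      = List.intercalate sep L := by
  rw [pvFlat]
  by_cases h : L = []
  · simp [h, List.intercalate]
  · rw [if_neg h]
    have : (List.intercalate sep L ++ sep).length - 3 = (List.intercalate sep L).length := by
      simp [hs]
    rw [this, List.take_left]

theorem pvJoin' {α : Type} (g : α → List Char) (L : List α) (sep : List Char)
    (hs : sep.length = 3) :
    ((L.map (fun i => g i ++ sep)).flatten).take (((L.map (fun i => g i ++ sep)).flatten).length - 3)
      = List.intercalate sep (L.map g) := by
  have := pvJoin (L.map g) sep hs
  simpa [List.map_map, Function.comp] using this

-- ===== VERDICT (by name: the statement is the Claim_ definition above) =====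
theorem gen_index_accumulating_spec : Claim_equal_gen_index_accumulating := by
  intro shape stride acc_dim _ _
  unfold Spec_gen_index_accumulating gen_index_accumulating gen_index_accumulating_alt
  simp only [pvOuterA, List.nil_append, List.foldl_reverse,
    List.range_eq_range', pvLoopB shape acc_dim shape.length 0 shape.length (by omega),
    List.reverse_reverse]
  rw [pvJoin' _ _ _ (by decide)]
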